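-- pv_equiv track=rewrite | github.com/kimmincheol-kor/Quiz_Algorithm | 2020_KAKAO_Test/KAKAO1_Solve.py | solution
-- ===== SOURCE A (Python) =====
-- def solution(new_id):
--     # Step 1.
--     new_list = list(new_id.lower())
--
--     # Step 2.
--     cnt = 0
--     for i in range(len(new_list)):
--         i -= cnt
--         if new_list[i].isalpha() == False and new_list[i].isdigit() == False and new_list[i] != '-' and new_list[i] != '_' and new_list[i] != '.':
--             del new_list[i]
--             cnt += 1
--
--         if len(new_list) == 0 or i > len(new_list)-1:
--             break
--
--     # Step 3.
--     cnt = 0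
--     for i in range(len(new_list)-1):
--         i -= cnt
--         if new_list[i] == '.' and new_list[i+1] == '.':
--             del new_list[i+1]
--             cnt += 1
--
--         if len(new_list) == 1 or i > len(new_list)-2:
--             break
--
--     # Step 4.
--     if new_list[0] == '.':
--         del new_list[0]
--     if len(new_list) > 0 and new_list[-1] == '.':
--         del new_list[-1]
--
--     # Step 5.
--     if len(new_list) == 0:
--         new_list = ['a']
--
--     # Step 6.
--     if len(new_list) > 15:
--         new_list = new_list[:15]
--         if new_list[-1] == '.':
--             del new_list[-1]
--
--     # Step 7.
--     if len(new_list) == 1: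
--         new_list.append(new_list[0])
--         new_list.append(new_list[0])
--     elif len(new_list) == 2:
--         new_list.append(new_list[1])
--
--     return ''.join(new_list)
-- ===== SOURCE B (Python) =====
-- def solution(new_id):
--     # Single forward pass: lowercase, drop disallowed chars, collapse dot runs.
--     out = []
--     prev_dot = False
--     for ch in new_id:
--         c = ch.lower()
--         if c.isalpha() or c.isdigit() or c in '-_':
--             out.append(c)
--             prev_dot = False
--         elif c == '.':
--             if not prev_dot:
--                 out.append(c)
--             prev_dot = True
--     s = ''.join(out)
--     # Strip a single leading/trailing dot (runs are already collapsed).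
--     if s.startswith('.'):
--         s = s[1:]
--     if s.endswith('.'):
--         s = s[:-1]
--     if not s:
--         s = 'a'
--     if len(s) > 15:
--         s = s[:15]
--         if s.endswith('.'):
--             s = s[:-1]
--     # Pad to length 3 with the last character.
--     return s + s[-1] * (3 - len(s))
-- ===== Notes on version B (the rewrite author's own statement) =====
-- stated objective: faster
-- what changed: Replaces A's three index-juggling passes with del (each del shifts the tail, O(n^2)) by a single forward pass that lowercases, filters and collapses dot-runs with a prev_dot flag, followed by fixed-size post-processing.
-- outside the precondition, e.g. on solution('!!'): A raises IndexError, B returns 'aaa'; on solution(''): A raises IndexError, B returns 'aaa'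
-- crash fix: On inputs containing no allowed character (letter, digit, hyphen, underscore or dot), e.g. the empty string or '!!', A raises IndexError at step 4; B returns the default id (the letter a padded to length three). — e.g. on solution("!?"): A raises IndexError, B returns "aaa"
import Mathlib
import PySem

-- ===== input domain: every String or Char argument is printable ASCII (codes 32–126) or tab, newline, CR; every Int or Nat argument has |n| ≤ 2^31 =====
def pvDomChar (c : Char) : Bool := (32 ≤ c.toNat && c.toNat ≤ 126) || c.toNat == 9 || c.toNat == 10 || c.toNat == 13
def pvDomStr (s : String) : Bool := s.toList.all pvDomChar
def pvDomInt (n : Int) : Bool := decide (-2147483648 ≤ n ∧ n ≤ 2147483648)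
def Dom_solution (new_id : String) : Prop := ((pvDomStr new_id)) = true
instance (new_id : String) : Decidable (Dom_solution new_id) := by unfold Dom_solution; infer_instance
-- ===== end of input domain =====

-- B replaces A's three quadratic del-based passes by one linear filtering pass with a
-- prev-dot flag plus fixed post-processing; proved to return the same string wherever A returns.


-- ===== PORT A =====
-- Step 2 loop: `for i in range(n): i -= cnt; if <not allowed>: del; cnt += 1; if <past end>: break`.
-- Fuel = number of remaining range iterations; state (lst, i, cnt) exactly as in A.
def pvStep2A : Nat → List Char → Nat → Nat → List Char
  | 0, lst, _, _ => lst
  | k+1, lst, i, cnt =>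
    let j := i - cnt          -- in A, i - cnt; cnt ≤ i always holds on reachable states
    let c := PySem.List.pyGetD lst (j : Int) ' '   -- new_list[i]; always in range when reached
    let st :=
      if PySem.Chars.isalpha c = false ∧ PySem.Chars.isdigit c = false ∧
         c ≠ '-' ∧ c ≠ '_' ∧ c ≠ '.' then
        (lst.eraseIdx j, cnt + 1)                  -- del new_list[i]
      else (lst, cnt)
    if st.1.length = 0 ∨ (j : Int) > (st.1.length : Int) - 1 then st.1
    else pvStep2A k st.1 (i + 1) st.2

-- Step 3 loop: `for i in range(n-1): i -= cnt; if lst[i]=='.' and lst[i+1]=='.': del lst[i+1]; …`.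
def pvStep3A : Nat → List Char → Nat → Nat → List Char
  | 0, lst, _, _ => lst
  | k+1, lst, i, cnt =>
    let j := i - cnt
    let st :=
      if PySem.List.pyGetD lst (j : Int) ' ' = '.' ∧
         PySem.List.pyGetD lst ((j : Int) + 1) ' ' = '.' then
        (lst.eraseIdx (j + 1), cnt + 1)            -- del new_list[i+1]
      else (lst, cnt)
    if st.1.length = 1 ∨ (j : Int) > (st.1.length : Int) - 2 then st.1
    else pvStep3A k st.1 (i + 1) st.2

def solution (new_id : String) : String :=
  -- Step 1.
  let l1 := (PySem.Str.lower new_id).toList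
  -- Step 2.
  let l2 := pvStep2A l1.length l1 0 0
  -- Step 3.
  let l3 := pvStep3A (l2.length - 1) l2 0 0
  -- Step 4.  (on [] Python raises IndexError at new_list[0]; excluded by Pre_solution)
  let l4 := match l3 with
    | [] => []
    | c :: rest => if c = '.' then rest else c :: rest
  let l5 := if 0 < l4.length ∧ PySem.List.pyGetD l4 (-1) ' ' = '.' then l4.dropLast else l4
  -- Step 5.
  let l6 := if l5.length = 0 then ['a'] else l5
  -- Step 6.
  let l7 :=
    if l6.length > 15 then
      let t := PySem.List.slice l6 none (some 15)
      if PySem.List.pyGetD t (-1) ' ' = '.' then t.dropLast else t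
    else l6
  -- Step 7.
  let l8 :=
    if l7.length = 1 then
      let t := l7 ++ [PySem.List.pyGetD l7 0 ' ']
      t ++ [PySem.List.pyGetD t 0 ' ']
    else if l7.length = 2 then l7 ++ [PySem.List.pyGetD l7 1 ' ']
    else l7
  String.ofList l8

-- ===== PORT B =====
-- One pass: lowercase each char, keep allowed ones, collapse dot runs with prev_dot.
def pvFuseB (st : List Char × Bool) (ch : Char) : List Char × Bool :=
  let c := PySem.Chars.lowerChar ch
  if PySem.Chars.isalpha c || PySem.Chars.isdigit c || c = '-' || c = '_' then
    (st.1 ++ [c], false)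
  else if c = '.' then
    (if st.2 then st.1 else st.1 ++ [c], true)
  else st

def solution_alt (new_id : String) : String :=
  let s0 := (new_id.toList.foldl pvFuseB ([], false)).1
  let s1 := if PySem.Chars.startswith s0 ['.'] then PySem.List.slice s0 (some 1) none else s0
  let s2 := if PySem.Chars.endswith s1 ['.'] then PySem.List.slice s1 none (some (-1)) else s1
  let s3 := if s2 = [] then ['a'] else s2
  let s4 :=
    if s3.length > 15 then
      let t := PySem.List.slice s3 none (some 15)
      if PySem.Chars.endswith t ['.'] then PySem.List.slice t none (some (-1)) else t
    else s3
  String.ofList (s4 ++ List.replicate (3 - s4.length) (PySem.List.pyGetD s4 (-1) ' '))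

-- ===== PRECONDITION & SPEC =====
-- Pre_ excludes exactly the inputs on which every character is disallowed (after lowering):
-- there A's step 4 indexes new_list[0] of an empty list and raises IndexError.
def pvAllowed (c : Char) : Bool :=
  PySem.Chars.isalpha c || PySem.Chars.isdigit c || c == '-' || c == '_' || c == '.'

def Pre_solution (new_id : String) : Prop :=
  new_id.toList.any (fun ch => pvAllowed (PySem.Chars.lowerChar ch)) = true
instance (new_id : String) : Decidable (Pre_solution new_id) := by
  unfold Pre_solution; infer_instance

def pvWitness_solution : String := "..Kim.Min=Cheol!2020.."

-- On inputs with no allowed character (after lowering) A raises IndexError at step 4 (new_list[0]); B returns the default id (letter a padded to length three).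
def Raises_solution (new_id : String) : Prop :=
  new_id.toList.all (fun ch => !(pvAllowed (PySem.Chars.lowerChar ch))) = true
instance (new_id : String) : Decidable (Raises_solution new_id) := by
  unfold Raises_solution; infer_instance
def pvRaiseWitness_solution : String := "!?"
def pvRaiseWitnessOut_solution : String := "aaa"

def Spec_solution (new_id : String) (out : String) : Prop := out = solution_alt new_id
instance (new_id : String) (out : String) : Decidable (Spec_solution new_id out) := by
  unfold Spec_solution; infer_instance

-- ===== CLAIM (what is proved, stated in full; the proofs are below) =====
def Claim_equal_solution : Prop :=
  ∀ (new_id : String), Dom_solution new_id → Pre_solution new_id →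
    Spec_solution new_id (solution new_id)

def Claim_raises_solution : Prop :=
  (∀ (new_id : String), Dom_solution new_id → Raises_solution new_id → ¬ Pre_solution new_id) ∧
  (Dom_solution (pvRaiseWitness_solution) ∧ Raises_solution (pvRaiseWitness_solution) ∧
    solution_alt (pvRaiseWitness_solution) = pvRaiseWitnessOut_solution)

-- ===== LEMMAS AND PROOFS =====

-- Collapse every run of dots to a single dot (the value of A's step 3).
def pvCollapse : List Char → List Char
  | [] => []
  | [c] => [c]
  | c :: d :: rest =>
    if c = '.' ∧ d = '.' then pvCollapse ('.' :: rest) else c :: pvCollapse (d :: rest)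
termination_by l => l.length

-- What B's fold appends, as a structural recursion on the input.
def pvFused : List Char → Bool → List Char
  | [], _ => []
  | ch :: t, pd =>
    let c := PySem.Chars.lowerChar ch
    if PySem.Chars.isalpha c || PySem.Chars.isdigit c || c = '-' || c = '_' then
      c :: pvFused t false
    else if c = '.' then (if pd then pvFused t true else '.' :: pvFused t true)
    else pvFused t pd

theorem pvGetD_append_len (kept rest : List Char) (c : Char) (d : Char) :
    (kept ++ c :: rest).getD kept.length d = c := by
  induction kept with
  | nil => rfl
  | cons a t ih => simpa using ih

theorem pvEraseIdx_append_len (kept rest : List Char) (c : Char) :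
    (kept ++ c :: rest).eraseIdx kept.length = kept ++ rest := by
  induction kept with
  | nil => rfl
  | cons a t ih => simpa using ih

theorem pvCollapse_cons_ne (c : Char) (xs : List Char) (h : ¬ c = '.') :
    pvCollapse (c :: xs) = c :: pvCollapse xs := by
  cases xs with
  | nil => simp [pvCollapse]
  | cons d t => rw [pvCollapse]; simp [h]

theorem pvCollapse_dots (xs : List Char) :
    pvCollapse ('.' :: '.' :: xs) = pvCollapse ('.' :: xs) := by
  rw [pvCollapse]; simp

theorem pvCollapse_cons_cons (c d : Char) (xs : List Char) (h : ¬ (c = '.' ∧ d = '.')) :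
    pvCollapse (c :: d :: xs) = c :: pvCollapse (d :: xs) := by
  rw [pvCollapse, if_neg h]

-- A's step-2 loop removes exactly the disallowed characters, in order.
theorem pvStep2A_spec (rest : List Char) : ∀ (kept : List Char) (cnt : Nat),
    pvStep2A rest.length (kept ++ rest) (kept.length + cnt) cnt
      = kept ++ rest.filter pvAllowed := by
  induction rest with
  | nil => intro kept cnt; simp [pvStep2A]
  | cons c rest' ih =>
    intro kept cnt
    rw [List.length_cons, pvStep2A]
    have hj : kept.length + cnt - cnt = kept.length := by omega
    have hget : PySem.List.pyGetD (kept ++ c :: rest') ((kept.length : Nat) : Int) ' '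
        = c := by
      rw [PySem.List.pyGetD_natCast]; exact pvGetD_append_len kept rest' c ' '
    by_cases hp : pvAllowed c = true
    · have hcond : ¬ (PySem.Chars.isalpha c = false ∧ PySem.Chars.isdigit c = false ∧
          ¬ c = '-' ∧ ¬ c = '_' ∧ ¬ c = '.') := by
        simp only [pvAllowed, Bool.or_eq_true, beq_iff_eq] at hp
        rcases hp with ((((h|h)|h)|h)|h) <;> simp [h]
      have hbreak : ¬ ((kept ++ c :: rest').length = 0 ∨
          ((kept.length : Nat) : Int) > ((kept ++ c :: rest').length : Int) - 1) := by
        intro h; simp only [List.length_append, List.length_cons] at h; omega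
      simp only [hj, hget, if_neg hcond]
      rw [if_neg hbreak]
      have h2 : kept ++ c :: rest' = (kept ++ [c]) ++ rest' := by simp
      have h3 : kept.length + cnt + 1 = (kept ++ [c]).length + cnt := by
        simp; omega
      rw [h2, h3, ih (kept ++ [c]) cnt]
      simp [List.filter_cons, hp]
    · have hcond : (PySem.Chars.isalpha c = false ∧ PySem.Chars.isdigit c = false ∧
          ¬ c = '-' ∧ ¬ c = '_' ∧ ¬ c = '.') := by
        simp only [pvAllowed, Bool.or_eq_true, beq_iff_eq] at hp
        push_neg at hp
        simp only [Bool.not_eq_true] at hp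
        tauto
      simp only [hj, hget, if_pos hcond, pvEraseIdx_append_len]
      cases rest' with
      | nil =>
        rw [if_pos (by simp only [List.append_nil, List.length_append, List.length_cons,
          List.length_nil]; omega)]
        simp [hp]
      | cons d t =>
        have hbreak : ¬ ((kept ++ d :: t).length = 0 ∨
            ((kept.length : Nat) : Int) > ((kept ++ d :: t).length : Int) - 1) := by
          intro h; simp only [List.length_append, List.length_cons] at h; omega
        rw [if_neg hbreak]
        have h3 : kept.length + cnt + 1 = kept.length + (cnt + 1) := by omega
        rw [h3, ih kept (cnt + 1)]
        simp [List.filter_cons, hp]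

-- A's step-3 loop collapses runs of dots.
theorem pvStep3A_spec (rest : List Char) : ∀ (kept : List Char) (c : Char) (cnt : Nat),
    pvStep3A rest.length (kept ++ c :: rest) (kept.length + cnt) cnt
      = kept ++ pvCollapse (c :: rest) := by
  induction rest with
  | nil => intro kept c cnt; simp [pvStep3A, pvCollapse]
  | cons d rest' ih =>
    intro kept c cnt
    rw [List.length_cons, pvStep3A]
    have hj : kept.length + cnt - cnt = kept.length := by omega
    have hget1 : PySem.List.pyGetD (kept ++ c :: d :: rest') ((kept.length : Nat) : Int) ' '
        = c := by
      rw [PySem.List.pyGetD_natCast]; exact pvGetD_append_len kept (d :: rest') c ' '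
    have hget2 : PySem.List.pyGetD (kept ++ c :: d :: rest')
        (((kept.length : Nat) : Int) + 1) ' ' = d := by
      have h2 : kept ++ c :: d :: rest' = (kept ++ [c]) ++ d :: rest' := by simp
      have h3 : ((kept.length : Nat) : Int) + 1 = (((kept ++ [c]).length : Nat) : Int) := by
        simp
      rw [h2, h3, PySem.List.pyGetD_natCast]
      exact pvGetD_append_len (kept ++ [c]) rest' d ' '
    by_cases hdd : c = '.' ∧ d = '.'
    · have herase : (kept ++ c :: d :: rest').eraseIdx (kept.length + 1)
          = kept ++ c :: rest' := by
        have h2 : kept ++ c :: d :: rest' = (kept ++ [c]) ++ d :: rest' := by simp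
        have h3 : kept.length + 1 = (kept ++ [c]).length := by simp
        rw [h2, h3, pvEraseIdx_append_len]
        simp
      simp only [hj, hget1, hget2, if_pos hdd, herase]
      cases rest' with
      | nil =>
        rw [if_pos (by simp only [List.length_append, List.length_cons, List.length_nil]; omega)]
        obtain ⟨hc, hd⟩ := hdd
        subst hc; subst hd
        rw [pvCollapse_dots]
        simp [pvCollapse]
      | cons e t =>
        have hbreak : ¬ ((kept ++ c :: e :: t).length = 1 ∨
            ((kept.length : Nat) : Int) > ((kept ++ c :: e :: t).length : Int) - 2) := by
          intro h; simp only [List.length_append, List.length_cons] at h; omega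
        rw [if_neg hbreak]
        have h3 : kept.length + cnt + 1 = kept.length + (cnt + 1) := by omega
        rw [h3, ih kept c (cnt + 1)]
        obtain ⟨hc, hd⟩ := hdd
        subst hc; subst hd
        rw [pvCollapse_dots]
    · have hbreak : ¬ ((kept ++ c :: d :: rest').length = 1 ∨
          ((kept.length : Nat) : Int) > ((kept ++ c :: d :: rest').length : Int) - 2) := by
        intro h; simp only [List.length_append, List.length_cons] at h; omega
      simp only [hj, hget1, hget2, if_neg hdd]
      rw [if_neg hbreak]
      have h2 : kept ++ c :: d :: rest' = (kept ++ [c]) ++ d :: rest' := by simp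
      have h3 : kept.length + cnt + 1 = (kept ++ [c]).length + cnt := by simp; omega
      rw [h2, h3, ih (kept ++ [c]) d cnt]
      rw [pvCollapse]
      simp [hdd]

-- B's fold appends pvFused.
theorem pvFuseB_foldl (l : List Char) : ∀ (out : List Char) (pd : Bool),
    (l.foldl pvFuseB (out, pd)).1 = out ++ pvFused l pd := by
  induction l with
  | nil => intro out pd; simp [pvFused]
  | cons ch t ih =>
    intro out pd
    rw [List.foldl_cons]
    have hst : pvFuseB (out, pd) ch = ((pvFuseB (out, pd) ch).1, (pvFuseB (out, pd) ch).2) :=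
      rfl
    rw [hst, ih]
    simp only [pvFuseB, pvFused]
    split_ifs <;> cases pd <;> simp_all

-- pvFused is collapse-after-filter (the pd flag standing for a pending dot).
theorem pvFused_spec (l : List Char) :
    pvFused l false = pvCollapse ((PySem.Chars.lower l).filter pvAllowed)
    ∧ '.' :: pvFused l true = pvCollapse ('.' :: (PySem.Chars.lower l).filter pvAllowed) := by
  induction l with
  | nil => simp [pvFused, pvCollapse, PySem.Chars.lower]
  | cons ch t ih =>
    have hlow : PySem.Chars.lower (ch :: t)
        = PySem.Chars.lowerChar ch :: PySem.Chars.lower t := by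
      simp [PySem.Chars.lower]
    rw [hlow]
    by_cases h1 : (PySem.Chars.isalpha (PySem.Chars.lowerChar ch)
        || PySem.Chars.isdigit (PySem.Chars.lowerChar ch)
        || PySem.Chars.lowerChar ch = '-' || PySem.Chars.lowerChar ch = '_') = true
    · have hcd : ¬ PySem.Chars.lowerChar ch = '.' := by
        intro he; rw [he] at h1; revert h1; decide
      have hall : pvAllowed (PySem.Chars.lowerChar ch) = true := by
        simp only [pvAllowed, Bool.or_eq_true, beq_iff_eq]
        simp only [Bool.or_eq_true, decide_eq_true_eq] at h1
        tauto
      have hne : ¬ (('.' : Char) = '.' ∧ PySem.Chars.lowerChar ch = '.') := by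
        intro hh; exact hcd hh.2
      constructor
      · simp only [pvFused]
        rw [if_pos h1, List.filter_cons, if_pos hall,
          pvCollapse_cons_ne _ _ hcd, ih.1]
      · simp only [pvFused]
        rw [if_pos h1, List.filter_cons, if_pos hall,
          pvCollapse_cons_cons _ _ _ hne, pvCollapse_cons_ne _ _ hcd, ih.1]
    · by_cases h2 : PySem.Chars.lowerChar ch = '.'
      · have hall : pvAllowed (PySem.Chars.lowerChar ch) = true := by rw [h2]; decide
        constructor
        · simp only [pvFused]
          rw [if_neg h1, if_pos h2, if_neg Bool.false_ne_true,
            List.filter_cons, if_pos hall, h2]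
          exact ih.2
        · simp only [pvFused]
          rw [if_neg h1, if_pos h2, if_true, List.filter_cons, if_pos hall, h2,
            pvCollapse_dots]
          exact ih.2
      · have hall : ¬ pvAllowed (PySem.Chars.lowerChar ch) = true := by
          simp only [pvAllowed, Bool.or_eq_true, beq_iff_eq]
          simp only [Bool.or_eq_true, decide_eq_true_eq] at h1
          push_neg at h1
          tauto
        constructor
        · simp only [pvFused]
          rw [if_neg h1, if_neg h2, List.filter_cons, if_neg hall]
          exact ih.1
        · simp only [pvFused]
          rw [if_neg h1, if_neg h2, List.filter_cons, if_neg hall]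
          exact ih.2

theorem pvCollapse_ne_nil (xs : List Char) (h : xs ≠ []) : pvCollapse xs ≠ [] := by
  induction xs using pvCollapse.induct with
  | case1 => exact absurd rfl h
  | case2 c => simp [pvCollapse]
  | case3 c d rest hdd ih => rw [pvCollapse, if_pos hdd]; exact ih (by simp)
  | case4 c d rest hdd ih => rw [pvCollapse, if_neg hdd]; simp

-- stage functions (proof-side names for the ports' post-processing steps; defeq to the port bodies)
def pvStep4A (x : List Char) : List Char :=
  match x with
  | [] => []
  | c :: rest => if c = '.' then rest else c :: rest
def pvStep5A (y : List Char) : List Char :=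
  if 0 < y.length ∧ PySem.List.pyGetD y (-1) ' ' = '.' then y.dropLast else y
def pvEmptyA (y : List Char) : List Char := if y.length = 0 then ['a'] else y
def pvStep6A (y : List Char) : List Char :=
  if y.length > 15 then
    if PySem.List.pyGetD (PySem.List.slice y none (some 15)) (-1) ' ' = '.' then
      (PySem.List.slice y none (some 15)).dropLast
    else PySem.List.slice y none (some 15)
  else y
def pvStep7A (y : List Char) : List Char :=
  if y.length = 1 then
    (y ++ [PySem.List.pyGetD y 0 ' ']) ++
      [PySem.List.pyGetD (y ++ [PySem.List.pyGetD y 0 ' ']) 0 ' ']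
  else if y.length = 2 then y ++ [PySem.List.pyGetD y 1 ' ']
  else y
def pvStep4B (x : List Char) : List Char :=
  if PySem.Chars.startswith x ['.'] then PySem.List.slice x (some 1) none else x
def pvStep5B (y : List Char) : List Char :=
  if PySem.Chars.endswith y ['.'] then PySem.List.slice y none (some (-1)) else y
def pvEmptyB (y : List Char) : List Char := if y = [] then ['a'] else y
def pvStep6B (y : List Char) : List Char :=
  if y.length > 15 then
    if PySem.Chars.endswith (PySem.List.slice y none (some 15)) ['.'] then
      PySem.List.slice (PySem.List.slice y none (some 15)) none (some (-1))
    else PySem.List.slice y none (some 15)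
  else y
def pvPadB (y : List Char) : List Char :=
  y ++ List.replicate (3 - y.length) (PySem.List.pyGetD y (-1) ' ')

-- A's test new_list[-1] == '.' matches B's endswith (with A's emptiness guard of step 4).
theorem pvEndsDot (y : List Char) :
    (PySem.Chars.endswith y ['.'] = true) ↔
      (0 < y.length ∧ PySem.List.pyGetD y (-1) ' ' = '.') := by
  constructor
  · intro h
    rw [PySem.Chars.endswith_iff] at h
    obtain ⟨pre, hpre⟩ := h
    subst hpre
    refine ⟨by simp, ?_⟩
    rw [PySem.List.pyGetD_neg_one_append_singleton]
  · rintro ⟨h0, h1⟩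
    have hy : y ≠ [] := by intro he; subst he; simp at h0
    rw [PySem.List.pyGetD_neg_one y ' ' hy] at h1
    rw [PySem.Chars.endswith_iff]
    exact ⟨y.dropLast, by rw [← h1]; exact List.dropLast_append_getLast hy⟩

theorem pvStrip2 (y : List Char) :
    (if PySem.List.pyGetD y (-1) ' ' = '.' then y.dropLast else y)
    = (if PySem.Chars.endswith y ['.'] then PySem.List.slice y none (some (-1)) else y) := by
  rw [PySem.List.slice_to_neg_one]
  cases y with
  | nil => simp [PySem.List.pyGetD, PySem.List.pyIdx?, PySem.Chars.endswith]
  | cons c t =>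
    by_cases h : PySem.List.pyGetD (c :: t) (-1) ' ' = '.'
    · rw [if_pos h, if_pos ((pvEndsDot (c :: t)).mpr ⟨by simp, h⟩)]
    · rw [if_neg h, if_neg (fun hc => h ((pvEndsDot (c :: t)).mp hc).2)]

theorem pvStep4_eq (x : List Char) (hx : x ≠ []) : pvStep4A x = pvStep4B x := by
  obtain ⟨c, xs, rfl⟩ := List.exists_cons_of_ne_nil hx
  have hsw : PySem.Chars.startswith (c :: xs) ['.'] = true ↔ c = '.' := by
    rw [PySem.Chars.startswith_iff]
    simp [List.cons_prefix_cons, eq_comm]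
  show (if c = '.' then xs else c :: xs) = pvStep4B (c :: xs)
  unfold pvStep4B
  by_cases hc : c = '.'
  · rw [if_pos hc, if_pos (hsw.mpr hc), PySem.List.slice_from_one, List.tail_cons]
  · rw [if_neg hc, if_neg (fun hb => hc (hsw.mp hb))]

theorem pvStep5_eq (y : List Char) : pvStep5A y = pvStep5B y := by
  unfold pvStep5A pvStep5B
  rw [PySem.List.slice_to_neg_one]
  by_cases h : 0 < y.length ∧ PySem.List.pyGetD y (-1) ' ' = '.'
  · rw [if_pos h, if_pos ((pvEndsDot y).mpr h)]
  · rw [if_neg h, if_neg (fun hc => h ((pvEndsDot y).mp hc))]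

theorem pvEmpty_eq (y : List Char) : pvEmptyA y = pvEmptyB y := by
  unfold pvEmptyA pvEmptyB
  simp [List.length_eq_zero_iff]

theorem pvStep6_eq (y : List Char) : pvStep6A y = pvStep6B y := by
  unfold pvStep6A pvStep6B
  by_cases h : y.length > 15
  · rw [if_pos h, if_pos h]
    exact pvStrip2 (PySem.List.slice y none (some 15))
  · rw [if_neg h, if_neg h]

-- A's step 7 (pad to length 3 by repeated append) is B's single replicate append.
theorem pvPad_eq (y : List Char) (hy : y ≠ []) : pvStep7A y = pvPadB y := by
  obtain ⟨c, t, rfl⟩ := List.exists_cons_of_ne_nil hy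
  unfold pvStep7A pvPadB
  cases t with
  | nil =>
    have h0 : PySem.List.pyGetD [c] 0 ' ' = c := rfl
    have h0' : PySem.List.pyGetD [c, c] 0 ' ' = c := rfl
    have hm : PySem.List.pyGetD [c] (-1) ' ' = c := rfl
    simp [h0, h0', hm]
  | cons d t' =>
    cases t' with
    | nil =>
      have h1 : PySem.List.pyGetD [c, d] 1 ' ' = d := rfl
      have hm : PySem.List.pyGetD [c, d] (-1) ' ' = d := rfl
      simp [h1, hm]
    | cons e t'' =>
      have h1 : ¬ (c :: d :: e :: t'').length = 1 := by simp
      have h2 : ¬ (c :: d :: e :: t'').length = 2 := by simp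
      rw [if_neg h1, if_neg h2]
      have h3 : 3 - (c :: d :: e :: t'').length = 0 := by simp
      rw [h3, List.replicate_zero, List.append_nil]

theorem pvEmptyB_ne (y : List Char) : pvEmptyB y ≠ [] := by
  unfold pvEmptyB
  split_ifs with h
  · simp
  · exact h

theorem pvStep6B_ne (y : List Char) (hy : y ≠ []) : pvStep6B y ≠ [] := by
  unfold pvStep6B
  split_ifs with h15 hdot
  · rw [PySem.List.slice_to_neg_one, PySem.List.slice_to _ (by omega : (0:Int) ≤ 15)]
    intro he
    have h := congrArg List.length he
    simp only [List.length_dropLast, List.length_take, List.length_nil] at h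
    simp only [show ((15:Int)).toNat = 15 from rfl] at h
    omega
  · rw [PySem.List.slice_to _ (by omega : (0:Int) ≤ 15)]
    intro he
    have h := congrArg List.length he
    simp only [List.length_take, List.length_nil] at h
    simp only [show ((15:Int)).toNat = 15 from rfl] at h
    omega
  · exact hy

theorem solution_eq_of_pre (new_id : String) (hpre : Pre_solution new_id) :
    solution new_id = solution_alt new_id := by
  have hA : solution new_id
      = String.ofList (pvStep7A (pvStep6A (pvEmptyA (pvStep5A (pvStep4A
          (pvStep3A
            ((pvStep2A (PySem.Str.lower new_id).toList.length
                (PySem.Str.lower new_id).toList 0 0).length - 1)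
            (pvStep2A (PySem.Str.lower new_id).toList.length
              (PySem.Str.lower new_id).toList 0 0) 0 0)))))) := rfl
  have hB : solution_alt new_id
      = String.ofList (pvPadB (pvStep6B (pvEmptyB (pvStep5B (pvStep4B
          (new_id.toList.foldl pvFuseB ([], false)).1))))) := rfl
  rw [hA, hB]
  have hl1 : (PySem.Str.lower new_id).toList = PySem.Chars.lower new_id.toList := by simp
  rw [hl1]
  have h2 : pvStep2A (PySem.Chars.lower new_id.toList).length
      (PySem.Chars.lower new_id.toList) 0 0
      = (PySem.Chars.lower new_id.toList).filter pvAllowed := by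
    have := pvStep2A_spec (PySem.Chars.lower new_id.toList) [] 0
    simpa using this
  rw [h2]
  have hne : (PySem.Chars.lower new_id.toList).filter pvAllowed ≠ [] := by
    unfold Pre_solution at hpre
    rw [List.any_eq_true] at hpre
    obtain ⟨ch, hmem, hall⟩ := hpre
    have hmem' : PySem.Chars.lowerChar ch ∈ PySem.Chars.lower new_id.toList := by
      simp only [PySem.Chars.lower]
      exact List.mem_map_of_mem hmem
    exact List.ne_nil_of_mem (List.mem_filter.mpr ⟨hmem', hall⟩)
  obtain ⟨c, xs, hx⟩ := List.exists_cons_of_ne_nil hne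
  rw [hx]
  have h3 : pvStep3A ((c :: xs).length - 1) (c :: xs) 0 0 = pvCollapse (c :: xs) := by
    have := pvStep3A_spec xs [] c 0
    simpa using this
  rw [h3]
  have hfe : (new_id.toList.foldl pvFuseB ([], false)).1 = pvCollapse (c :: xs) := by
    rw [pvFuseB_foldl new_id.toList [] false, List.nil_append,
      (pvFused_spec new_id.toList).1, ← hx]
  rw [hfe]
  have hyne : pvCollapse (c :: xs) ≠ [] := pvCollapse_ne_nil _ (by simp)
  rw [pvStep4_eq _ hyne, pvStep5_eq, pvEmpty_eq, pvStep6_eq,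
    pvPad_eq _ (pvStep6B_ne _ (pvEmptyB_ne _))]

-- ===== VERDICT (by name: the statement is the Claim_ definition above) =====
theorem solution_spec : Claim_equal_solution := by
  intro new_id _ hpre
  exact solution_eq_of_pre new_id hpre

@[simp] theorem solution_raises : Claim_raises_solution := by
  unfold Claim_raises_solution
  constructor
  · intro new_id _ hr hp
    unfold Raises_solution at hr
    unfold Pre_solution at hp
    simp only [List.all_eq_true, List.any_eq_true] at hr hp
    obtain ⟨ch, hm, hc⟩ := hp
    have := hr ch hm
    simp [hc] at this
  · refine ⟨by decide, by decide, by decide⟩
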